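-- pv_equiv track=rewrite | github.com/alx/skysplat2roblox | pipeline/splat_reader.py | _extract_ply_meta
-- ===== SOURCE A (Python) =====
-- _PLY_DTYPE_MAP = {
--     "float":   "f4", "float32": "f4",
--     "double":  "f8", "float64": "f8",
--     "int":     "i4", "int32":   "i4",
--     "uint":    "u4", "uint32":  "u4",
--     "short":   "i2", "int16":   "i2",
--     "ushort":  "u2", "uint16":  "u2",
--     "char":    "i1", "int8":    "i1",
--     "uchar":   "u1", "uint8":   "u1",
-- }
--
-- def _extract_ply_meta(lines):
--     props = []
--     n_verts = 0
--     is_binary = False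
--     is_big_endian = False
--     in_vertex = False
--
--     for line in lines:
--         parts = line.split()
--         if not parts:
--             continue
--         if parts[0] == "format":
--             is_binary = parts[1] != "ascii"
--             is_big_endian = parts[1] == "binary_big_endian"
--         elif parts[0] == "element" and parts[1] == "vertex":
--             n_verts = int(parts[2])
--             in_vertex = True
--         elif parts[0] == "element" and parts[1] != "vertex":
--             in_vertex = False
--         elif parts[0] == "property" and in_vertex:
--             dtype_str = parts[1]
--             prop_name = parts[2]
--             dtype = _PLY_DTYPE_MAP.get(dtype_str, "f4")
--             if is_big_endian:
--                 dtype = ">" + dtype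
--             props.append((prop_name, dtype))
--
--     return props, n_verts, is_binary, is_big_endian
-- ===== SOURCE B (Python) =====
-- _PLY_DTYPE_MAP = {
--     "float":   "f4", "float32": "f4",
--     "double":  "f8", "float64": "f8",
--     "int":     "i4", "int32":   "i4",
--     "uint":    "u4", "uint32":  "u4",
--     "short":   "i2", "int16":   "i2",
--     "ushort":  "u2", "uint16":  "u2",
--     "char":    "i1", "int8":    "i1",
--     "uchar":   "u1", "uint8":   "u1",
-- }
--
-- def _extract_ply_meta(lines):
--     # tokenize once, dropping blank lines
--     toks = [t for t in (line.split() for line in lines) if t]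
--     # format / count fields: last occurrence wins
--     fmts = [t[1] for t in toks if t[0] == "format"]
--     is_binary = bool(fmts) and fmts[-1] != "ascii"
--     is_big_endian = bool(fmts) and fmts[-1] == "binary_big_endian"
--     verts = [int(t[2]) for t in toks if t[0] == "element" and t[1] == "vertex"]
--     n_verts = verts[-1] if verts else 0
--     # properties: scan carrying only the endianness/in-vertex flags
--     props = []
--     big = False
--     inv = False
--     for t in toks:
--         if t[0] == "format":
--             big = t[1] == "binary_big_endian"
--         elif t[0] == "element":
--             inv = t[1] == "vertex"
--         elif t[0] == "property" and inv:
--             name = t[2]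
--             props.append((name, (">" if big else "") + _PLY_DTYPE_MAP.get(t[1], "f4")))
--     return props, n_verts, is_binary, is_big_endian
-- ===== Notes on version B (the rewrite author's own statement) =====
-- stated objective: alternative
-- what changed: A threads five mutable state variables through one loop; B tokenizes once, derives the format flags and vertex count by last-occurrence-wins comprehensions over the token lists, and builds the property list in a separate scan that carries only the two flags that actually influence it.
-- outside the precondition, e.g. on _extract_ply_meta(['property f']): A returns ([], 0, False, False), B returns ([], 0, False, False)
import Mathlib
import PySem

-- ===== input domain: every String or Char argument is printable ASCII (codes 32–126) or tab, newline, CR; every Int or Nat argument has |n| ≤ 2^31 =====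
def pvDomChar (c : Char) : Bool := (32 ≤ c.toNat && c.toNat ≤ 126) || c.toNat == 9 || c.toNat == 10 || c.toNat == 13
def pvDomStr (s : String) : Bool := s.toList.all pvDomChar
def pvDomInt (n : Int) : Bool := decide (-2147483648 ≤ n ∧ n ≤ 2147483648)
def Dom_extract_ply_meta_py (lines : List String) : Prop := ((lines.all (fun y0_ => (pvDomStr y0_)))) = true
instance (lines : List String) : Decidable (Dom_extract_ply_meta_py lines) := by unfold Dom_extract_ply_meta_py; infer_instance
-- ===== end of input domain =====

-- B re-decomposes A's single five-variable loop into last-occurrence-wins passes plus a two-flag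
-- property scan; same results on Pre_ (where Python A does not raise); equal cost (alternative).

-- ===== PORT A =====
-- the module constant _PLY_DTYPE_MAP (shared by both Pythons)
def plyDtypeMap : PySem.Dict String String :=
  PySem.Dict.ofList
    [("float","f4"),("float32","f4"),("double","f8"),("float64","f8"),
     ("int","i4"),("int32","i4"),("uint","u4"),("uint32","u4"),
     ("short","i2"),("int16","i2"),("ushort","u2"),("uint16","u2"),
     ("char","i1"),("int8","i1"),("uchar","u1"),("uint8","u1")]

-- one iteration of A's loop, acting on the already-split line; 'if not parts: continue' is the
-- first branch.  Where Python A would raise (a short line, int() failing) the port reads a default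
-- ("" / 0); Pre_ excludes exactly those inputs.
def plyBodyA (st : (List (String × String)) × Int × Bool × Bool × Bool) (parts : List String) :
    (List (String × String)) × Int × Bool × Bool × Bool :=
  if parts == [] then st
  else if parts.getD 0 "" == "format" then
    (st.1, st.2.1, parts.getD 1 "" != "ascii", parts.getD 1 "" == "binary_big_endian", st.2.2.2.2)
  else if parts.getD 0 "" == "element" && parts.getD 1 "" == "vertex" then
    (st.1, (PySem.Int.ofStr? (parts.getD 2 "")).getD 0, st.2.2.1, st.2.2.2.1, true)
  else if parts.getD 0 "" == "element" && !(parts.getD 1 "" == "vertex") then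
    (st.1, st.2.1, st.2.2.1, st.2.2.2.1, false)
  else if parts.getD 0 "" == "property" && st.2.2.2.2 then
    let dtype := plyDtypeMap.getD (parts.getD 1 "") "f4"
    let dtype := if st.2.2.2.1 then ">" ++ dtype else dtype
    (st.1 ++ [(parts.getD 2 "", dtype)], st.2.1, st.2.2.1, st.2.2.2.1, st.2.2.2.2)
  else st

def extract_ply_meta_py (lines : List String) : (List (String × String)) × Int × Bool × Bool :=
  let r := lines.foldl (fun st line => plyBodyA st (PySem.Str.split₀ line)) ([], 0, false, false, false)
  (r.1, r.2.1, r.2.2.1, r.2.2.2.1)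

-- ===== PORT B =====
-- the filter 'if t' of B's tokenizing comprehension
def plyKeep (t : List String) : Bool := !(t == [])

-- [t[1] for t in toks if t[0] == "format"]
def plyFmtTok (t : List String) : Option String :=
  if t.getD 0 "" == "format" then some (t.getD 1 "") else none

-- [int(t[2]) for t in toks if t[0] == "element" and t[1] == "vertex"]
def plyVertTok (t : List String) : Option Int :=
  if t.getD 0 "" == "element" && t.getD 1 "" == "vertex" then
    some ((PySem.Int.ofStr? (t.getD 2 "")).getD 0)
  else none

-- one iteration of B's property scan (state: props, big, inv)
def plyPropStep (st : (List (String × String)) × Bool × Bool) (t : List String) :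
    (List (String × String)) × Bool × Bool :=
  if t.getD 0 "" == "format" then (st.1, t.getD 1 "" == "binary_big_endian", st.2.2)
  else if t.getD 0 "" == "element" then (st.1, st.2.1, t.getD 1 "" == "vertex")
  else if t.getD 0 "" == "property" && st.2.2 then
    (st.1 ++ [(t.getD 2 "", (if st.2.1 then ">" else "") ++ plyDtypeMap.getD (t.getD 1 "") "f4")],
     st.2.1, st.2.2)
  else st

def extract_ply_meta_py_alt (lines : List String) : (List (String × String)) × Int × Bool × Bool :=
  let toks := (lines.map PySem.Str.split₀).filter plyKeep
  let fmts := toks.filterMap plyFmtTok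
  let is_binary := match fmts.getLast? with | none => false | some f => f != "ascii"
  let is_big_endian := match fmts.getLast? with | none => false | some f => f == "binary_big_endian"
  let n_verts := (toks.filterMap plyVertTok).getLast?.getD 0
  let props := (toks.foldl plyPropStep ([], false, false)).1
  (props, n_verts, is_binary, is_big_endian)

-- ===== PRECONDITION & SPEC =====
-- Pre_ excludes the headers on which Python A raises (IndexError on a 'format'/'element'/'property'
-- line with too few tokens, ValueError when the vertex count is not int()-parsable); the ≥3-token
-- requirement on 'property' lines is imposed on every such line, which also excludes some headers
-- where a short property line occurs outside the vertex element and A returns (B returns the same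
-- value there).
def Pre_extract_ply_meta_py (lines : List String) : Prop :=
  ∀ line ∈ lines,
    ((PySem.Str.split₀ line).getD 0 "" = "format" → 2 ≤ (PySem.Str.split₀ line).length) ∧
    ((PySem.Str.split₀ line).getD 0 "" = "element" →
       2 ≤ (PySem.Str.split₀ line).length ∧
       ((PySem.Str.split₀ line).getD 1 "" = "vertex" →
          3 ≤ (PySem.Str.split₀ line).length ∧
          (PySem.Int.ofStr? ((PySem.Str.split₀ line).getD 2 "")).isSome)) ∧
    ((PySem.Str.split₀ line).getD 0 "" = "property" → 3 ≤ (PySem.Str.split₀ line).length)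
instance (lines : List String) : Decidable (Pre_extract_ply_meta_py lines) := by
  unfold Pre_extract_ply_meta_py; infer_instance

def pvWitness_extract_ply_meta_py : List String :=
  ["ply", "format binary_big_endian 1.0", "element vertex 2",
   "property float x", "property uchar red", "element face 0", "end_header"]

def Spec_extract_ply_meta_py (lines : List String) (out : (List (String × String)) × Int × Bool × Bool) : Prop := out = extract_ply_meta_py_alt lines
instance (lines : List String) (out : (List (String × String)) × Int × Bool × Bool) : Decidable (Spec_extract_ply_meta_py lines out) := by unfold Spec_extract_ply_meta_py; infer_instance

-- ===== CLAIM (what is proved, stated in full; the proofs are below) =====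
def Claim_equal_extract_ply_meta_py : Prop := ∀ (lines : List String), Dom_extract_ply_meta_py lines → Pre_extract_ply_meta_py lines → Spec_extract_ply_meta_py lines (extract_ply_meta_py lines)

-- ===== LEMMAS AND PROOFS =====

lemma plyBodyA_nil (s : (List (String × String)) × Int × Bool × Bool × Bool) :
    plyBodyA s [] = s := rfl

-- A's fold over raw lines equals the same body folded over the non-empty token lists
lemma foldA_lines_eq_toks (lines : List String)
    (s : (List (String × String)) × Int × Bool × Bool × Bool) :
    lines.foldl (fun st line => plyBodyA st (PySem.Str.split₀ line)) s =
      ((lines.map PySem.Str.split₀).filter plyKeep).foldl plyBodyA s := by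
  induction lines generalizing s with
  | nil => rfl
  | cons l ls ih =>
      rw [List.foldl_cons, List.map_cons, List.filter_cons]
      by_cases h : PySem.Str.split₀ l = []
      · rw [h, plyBodyA_nil]
        have hk : plyKeep ([] : List String) = false := rfl
        rw [hk]
        simpa using ih s
      · have hk : plyKeep (PySem.Str.split₀ l) = true := by
          unfold plyKeep; simpa using h
        rw [hk]
        simpa using ih (plyBodyA s (PySem.Str.split₀ l))

-- last-wins helper: getLast?-elim over a cons
lemma lastElim {β γ : Type} (l : List β) (v : β) (d : γ) (g : β → γ) :
    ((v :: l).getLast?).elim d g = (l.getLast?).elim (g v) g := by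
  cases l with
  | nil => rfl
  | cons w l =>
      rw [List.getLast?_cons_cons]
      cases h : (w :: l).getLast? with
      | none => simp [List.getLast?_eq_none_iff] at h
      | some x => rfl

-- how one step of A acts on the (props, big, inv) projection: exactly B's property scan
lemma stepA_proj (s : (List (String × String)) × Int × Bool × Bool × Bool) (t : List String) :
    ((plyBodyA s t).1, (plyBodyA s t).2.2.2.1, (plyBodyA s t).2.2.2.2) =
      plyPropStep (s.1, s.2.2.2.1, s.2.2.2.2) t := by
  unfold plyBodyA plyPropStep
  by_cases h0 : t = []
  · subst h0; simp
  · by_cases hf : t[0]?.getD "" = "format"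
    · simp [h0, hf]
    · by_cases he : t[0]?.getD "" = "element"
      · by_cases hv : t[1]?.getD "" = "vertex" <;> simp [h0, hf, he, hv]
      · by_cases hp : t[0]?.getD "" = "property"
        · by_cases hi : s.2.2.2.2 = true
          · cases hb : s.2.2.2.1 <;> simp [h0, hf, he, hp, hi, hb]
          · simp [h0, hf, he, hp, Bool.eq_false_iff.2 hi]
        · simp [h0, hf, he, hp]

-- a step that is not an element-vertex line keeps n_verts; an element-vertex line sets it
lemma stepA_n (s : (List (String × String)) × Int × Bool × Bool × Bool) (t : List String) :
    (plyBodyA s t).2.1 = (plyVertTok t).elim s.2.1 (fun v => v) := by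
  unfold plyBodyA plyVertTok
  by_cases h0 : t = []
  · subst h0; simp
  · by_cases hf : t[0]?.getD "" = "format"
    · have : t[0]?.getD "" ≠ "element" := by rw [hf]; decide
      simp [h0, hf, this]
    · by_cases he : t[0]?.getD "" = "element"
      · by_cases hv : t[1]?.getD "" = "vertex" <;> simp [h0, hf, he, hv]
      · by_cases hp : t[0]?.getD "" = "property"
        · by_cases hi : s.2.2.2.2 = true
          · simp [h0, hf, he, hp, hi]
          · simp [h0, hf, he, hp, Bool.eq_false_iff.2 hi]
        · simp [h0, hf, he, hp]

-- a non-format line keeps both format flags; a format line sets them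
lemma stepA_flags (s : (List (String × String)) × Int × Bool × Bool × Bool) (t : List String) :
    (plyBodyA s t).2.2.1 = (plyFmtTok t).elim s.2.2.1 (fun f => f != "ascii") ∧
    (plyBodyA s t).2.2.2.1 = (plyFmtTok t).elim s.2.2.2.1 (fun f => f == "binary_big_endian") := by
  unfold plyBodyA plyFmtTok
  by_cases h0 : t = []
  · subst h0; simp
  · by_cases hf : t[0]?.getD "" = "format"
    · simp [h0, hf]
    · by_cases he : t[0]?.getD "" = "element"
      · by_cases hv : t[1]?.getD "" = "vertex" <;> simp [h0, hf, he, hv]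
      · by_cases hp : t[0]?.getD "" = "property"
        · by_cases hi : s.2.2.2.2 = true
          · simp [h0, hf, he, hp, hi]
          · simp [h0, hf, he, hp, Bool.eq_false_iff.2 hi]
        · simp [h0, hf, he, hp]

-- the (props, big, inv) projection of A's fold is B's property scan
lemma foldA_proj_propStep (toks : List (List String))
    (s : (List (String × String)) × Int × Bool × Bool × Bool) :
    ((toks.foldl plyBodyA s).1, (toks.foldl plyBodyA s).2.2.2.1, (toks.foldl plyBodyA s).2.2.2.2) =
      toks.foldl plyPropStep (s.1, s.2.2.2.1, s.2.2.2.2) := by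
  induction toks generalizing s with
  | nil => rfl
  | cons t ts ih =>
      rw [List.foldl_cons, List.foldl_cons, ih, ← stepA_proj]

-- the n_verts component of A's fold is the last element-vertex count
lemma foldA_nverts (toks : List (List String))
    (s : (List (String × String)) × Int × Bool × Bool × Bool) :
    (toks.foldl plyBodyA s).2.1 =
      ((toks.filterMap plyVertTok).getLast?).elim s.2.1 (fun v => v) := by
  induction toks generalizing s with
  | nil => rfl
  | cons t ts ih =>
      rw [List.foldl_cons, List.filterMap_cons, ih]
      cases hv : plyVertTok t with
      | some v => rw [lastElim]; rw [stepA_n, hv]; rfl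
      | none => rw [stepA_n, hv]; rfl

-- the is_binary / is_big_endian components of A's fold come from the last format line
lemma foldA_flags (toks : List (List String))
    (s : (List (String × String)) × Int × Bool × Bool × Bool) :
    (toks.foldl plyBodyA s).2.2.1 =
      ((toks.filterMap plyFmtTok).getLast?).elim s.2.2.1 (fun f => f != "ascii") ∧
    (toks.foldl plyBodyA s).2.2.2.1 =
      ((toks.filterMap plyFmtTok).getLast?).elim s.2.2.2.1 (fun f => f == "binary_big_endian") := by
  induction toks generalizing s with
  | nil => exact ⟨rfl, rfl⟩
  | cons t ts ih =>
      rw [List.foldl_cons, List.filterMap_cons]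
      cases hv : plyFmtTok t with
      | some f =>
          rw [(ih _).1, (ih _).2, lastElim, lastElim,
              (stepA_flags s t).1, (stepA_flags s t).2, hv]
          exact ⟨rfl, rfl⟩
      | none =>
          rw [(ih _).1, (ih _).2, (stepA_flags s t).1, (stepA_flags s t).2, hv]
          exact ⟨rfl, rfl⟩

-- ===== VERDICT (by name: the statement is the Claim_ definition above) =====
theorem extract_ply_meta_py_spec : Claim_equal_extract_ply_meta_py := by
  intro lines _ _
  unfold Spec_extract_ply_meta_py extract_ply_meta_py extract_ply_meta_py_alt
  rw [foldA_lines_eq_toks]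
  set toks := (lines.map PySem.Str.split₀).filter plyKeep with htoks
  have hproj := foldA_proj_propStep toks ([], 0, false, false, false)
  have hn := foldA_nverts toks ([], 0, false, false, false)
  have hfl := foldA_flags toks ([], 0, false, false, false)
  refine Prod.ext ?_ (Prod.ext ?_ (Prod.ext ?_ ?_)) <;> simp only
  · exact congrArg (fun p => p.1) hproj
  · rw [hn]
    cases h : (toks.filterMap plyVertTok).getLast? <;> rfl
  · rw [hfl.1]
    cases h : (toks.filterMap plyFmtTok).getLast? <;> rfl
  · rw [hfl.2]
    cases h : (toks.filterMap plyFmtTok).getLast? <;> rfl
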